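-- pv_equiv track=rewrite | github.com/darkdenlion/typingtui | typing_tui.py | split_completed_words
-- ===== SOURCE A (Python) =====
-- from typing import Dict, List, Optional, Tuple
--
-- def split_completed_words(value: str) -> Tuple[List[str], str]:
--     """
--     Return (completed_words, fragment_without_spaces).
--     Treat one or more spaces as delimiter.
--     """
--     if not value:
--         return [], ""
--     if " " not in value:
--         return [], value
--
--     parts = value.split(" ")
--     completed = [p for p in parts[:-1] if p != ""]
--     fragment = parts[-1]
--     return completed, fragment
-- ===== SOURCE B (Python) =====
-- from typing import List, Tuple
--
-- def split_completed_words(value: str) -> Tuple[List[str], str]: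
--     """
--     Return (completed_words, fragment_without_spaces) in a single
--     left-to-right character scan, without calling str.split.
--     """
--     completed: List[str] = []
--     word = ""
--     for ch in value:
--         if ch == " ":
--             if word:
--                 completed.append(word)
--             word = ""
--         else:
--             word += ch
--     return completed, word
-- ===== Notes on version B (the rewrite author's own statement) =====
-- stated objective: alternative
-- what changed: Replaces str.split plus two guards, a slice/filter comprehension and a negative index with a single left-to-right character scan that accumulates completed words and keeps the trailing fragment as the pending word.
import Mathlib
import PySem

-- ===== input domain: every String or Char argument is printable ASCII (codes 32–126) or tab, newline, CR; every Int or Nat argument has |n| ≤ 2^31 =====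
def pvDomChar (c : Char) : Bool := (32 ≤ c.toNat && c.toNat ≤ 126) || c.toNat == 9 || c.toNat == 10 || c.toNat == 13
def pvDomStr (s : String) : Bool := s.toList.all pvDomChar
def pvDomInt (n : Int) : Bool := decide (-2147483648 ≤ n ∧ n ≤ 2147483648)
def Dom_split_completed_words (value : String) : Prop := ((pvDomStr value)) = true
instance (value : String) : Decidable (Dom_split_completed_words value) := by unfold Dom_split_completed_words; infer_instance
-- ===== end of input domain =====

-- B replaces split-slice-index with a single left-to-right character scan (objective: alternative).

-- ===== PORT A =====
def split_completed_words (value : String) : List String × String :=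
  if value = "" then ([], "")
  else if PySem.Str.isIn " " value = false then ([], value)
  else
    let parts := (PySem.Str.split? value " ").getD []
    let completed := (PySem.List.slice parts none (some (-1))).filter (fun p => decide (p ≠ ""))
    -- parts is never empty, so parts[-1] never raises; .getD "" is unreachable
    let fragment := (PySem.List.pyGet? parts (-1)).getD ""
    (completed, fragment)

-- ===== PORT B =====
def split_completed_words_alt (value : String) : List String × String :=
  let st := value.toList.foldl
    (fun (st : List String × List Char) ch =>
      if ch = ' ' then
        ((if st.2 ≠ [] then st.1 ++ [String.ofList st.2] else st.1), [])
      else (st.1, st.2 ++ [ch]))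
    ([], [])
  (st.1, String.ofList st.2)

-- ===== PRECONDITION & SPEC =====
def Spec_split_completed_words (value : String) (out : List String × String) : Prop := out = split_completed_words_alt value
instance (value : String) (out : List String × String) : Decidable (Spec_split_completed_words value out) := by unfold Spec_split_completed_words; infer_instance

-- ===== CLAIM (what is proved, stated in full; the proofs are below) =====
def Claim_equal_split_completed_words : Prop := ∀ (value : String), Dom_split_completed_words value → Spec_split_completed_words value (split_completed_words value)

-- ===== LEMMAS AND PROOFS =====

/-- Splitting on a single space, carried with an explicit current word. -/
def spAux : List Char → List Char → List (List Char)
  | cur, [] => [cur]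
  | cur, c :: rest => if c = ' ' then cur :: spAux [] rest else spAux (cur ++ [c]) rest

theorem spAux_ne_nil (cur cs : List Char) : spAux cur cs ≠ [] := by
  induction cs generalizing cur with
  | nil => simp [spAux]
  | cons c rest ih => by_cases h : c = ' ' <;> simp [spAux, h, ih]

theorem getLastD_irrel {α : Type} (l : List α) (h : l ≠ []) (d d' : α) :
    l.getLastD d = l.getLastD d' := by
  cases l with
  | nil => exact absurd rfl h
  | cons a b => rw [List.getLastD_cons, List.getLastD_cons]

theorem splitOn_go_eq : ∀ (fuel : Nat) (l cur : List Char) (acc : List (List Char)),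
    l.length < fuel →
    PySem.Chars.splitOn.go [' '] fuel l cur acc = acc.reverse ++ spAux cur.reverse l := by
  intro fuel
  induction fuel with
  | zero => intro l cur acc h; omega
  | succ n ih =>
    intro l cur acc h
    cases l with
    | nil => simp [PySem.Chars.splitOn.go, spAux]
    | cons c rest =>
      by_cases hc : c = ' '
      · subst hc
        rw [PySem.Chars.splitOn.go]
        rw [if_pos (by simp [List.isPrefixOf])]
        simp only [List.length_singleton, List.drop_one, List.tail_cons]
        rw [ih rest [] (cur.reverse :: acc) (by simp at h ⊢; omega)]
        simp [spAux]
      · rw [PySem.Chars.splitOn.go]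
        rw [if_neg (by simp [List.isPrefixOf]; intro h'; exact hc h'.symm)]
        rw [ih rest (c :: cur) acc (by simp at h ⊢; omega)]
        simp [spAux, hc]

theorem splitOn_space (cs : List Char) : PySem.Chars.splitOn cs [' '] = spAux [] cs := by
  unfold PySem.Chars.splitOn
  rw [splitOn_go_eq (cs.length + 1) cs [] [] (by omega)]
  simp

theorem spAux_no_space (cs : List Char) (h : ' ' ∉ cs) (cur : List Char) :
    spAux cur cs = [cur ++ cs] := by
  induction cs generalizing cur with
  | nil => simp [spAux]
  | cons c rest ih =>
    simp only [List.mem_cons, not_or] at h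
    simp [spAux, Ne.symm h.1, ih h.2]

theorem fold_eq (cs : List Char) : ∀ (acc : List String) (w : List Char),
    cs.foldl
      (fun (st : List String × List Char) ch =>
        if ch = ' ' then
          ((if st.2 ≠ [] then st.1 ++ [String.ofList st.2] else st.1), [])
        else (st.1, st.2 ++ [ch]))
      (acc, w)
    = (acc ++ ((spAux w cs).dropLast.filter (fun l => decide (l ≠ []))).map String.ofList,
       (spAux w cs).getLastD []) := by
  induction cs with
  | nil => intro acc w; simp [spAux]
  | cons c rest ih =>
    intro acc w
    by_cases hc : c = ' '
    · subst hc
      rw [List.foldl_cons, if_pos rfl]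
      rw [show ((if (acc, w).2 ≠ [] then (acc, w).1 ++ [String.ofList (acc, w).2] else (acc, w).1,
            ([] : List Char)))
          = ((if w ≠ [] then acc ++ [String.ofList w] else acc), ([] : List Char)) from rfl]
      rw [ih]
      have hne := spAux_ne_nil [] rest
      have hsp : spAux w (' ' :: rest) = w :: spAux [] rest := by simp [spAux]
      rw [hsp]
      simp only [Prod.mk.injEq]
      refine ⟨?_, ?_⟩
      · rw [List.dropLast_cons_of_ne_nil hne, List.filter_cons]
        by_cases hw : w = [] <;> simp [hw]
      · rw [List.getLastD_cons]
        exact (getLastD_irrel _ hne _ _).symm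
    · rw [List.foldl_cons, if_neg hc]
      rw [show ((acc, w).1, (acc, w).2 ++ [c]) = (acc, w ++ [c]) from rfl]
      rw [ih]
      simp [spAux, hc]

theorem alt_closed (value : String) :
    split_completed_words_alt value
      = (((spAux [] value.toList).dropLast.filter (fun l => decide (l ≠ []))).map String.ofList,
         String.ofList ((spAux [] value.toList).getLastD [])) := by
  unfold split_completed_words_alt
  rw [fold_eq]
  rfl

theorem split_completed_words_spec' (value : String) :
    split_completed_words value = split_completed_words_alt value := by
  rw [alt_closed]
  unfold split_completed_words
  by_cases h0 : value = ""
  · subst h0; simp [spAux]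
  · rw [if_neg h0]
    by_cases hin : PySem.Str.isIn " " value = false
    · rw [if_pos hin]
      have hnotin : ' ' ∉ value.toList := by
        intro hmem
        have hinf : [' '] <:+: value.toList := by
          rcases List.mem_iff_append.mp hmem with ⟨s, t, hst⟩
          exact ⟨s, t, by simpa using hst.symm⟩
        have htrue := (PySem.Chars.isIn_iff_infix [' '] value.toList).mpr hinf
        have hfalse : PySem.Chars.isIn [' '] value.toList = false := by simpa using hin
        rw [hfalse] at htrue
        exact absurd htrue (by decide)
      rw [spAux_no_space _ hnotin]
      simp
    · rw [if_neg hin]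
      have hsplit : (PySem.Str.split? value " ").getD []
          = (spAux [] value.toList).map String.ofList := by
        simp [PySem.Str.split?, PySem.Chars.split?, splitOn_space]
      simp only [hsplit]
      have hne := spAux_ne_nil [] value.toList
      simp only [Prod.mk.injEq]
      refine ⟨?_, ?_⟩
      · rw [PySem.List.slice_to_neg_one, ← List.map_dropLast, List.filter_map]
        congr 1
        apply List.filter_congr
        intro l _
        simp [Function.comp]
      · rw [PySem.List.pyGet?_neg_one, List.getLast?_map]
        cases hr : spAux [] value.toList with
        | nil => exact absurd hr hne
        | cons a b =>
          rw [List.getLastD_eq_getLast?]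
          simp

-- ===== VERDICT (by name: the statement is the Claim_ definition above) =====
theorem split_completed_words_spec : Claim_equal_split_completed_words := by
  intro value _
  unfold Spec_split_completed_words
  exact split_completed_words_spec' value
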